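-- pv_equiv track=rewrite | github.com/GeorgMiller/Hypernetworks | DouDizhu/doudizhu/utils.py | encode_cards
-- ===== SOURCE A (Python) =====
-- CARD_RANK_STR = ['3', '4', '5', '6', '7', '8', '9', 'T', 'J', 'Q', 'K',
--                  'A', '2', 'B', 'R']
--
-- def encode_cards(plane, cards):
--     '''
--     Encode cards and represent it into plane.
--
--     Args:
--         cards (list or str): list or str of cards, every entry is a
--     character of solo representation of card
--
--     column: rank of the cards(in the order: 3456789TJQK2BR)
--     row: number of cards player has for a certain rank (1, 2, 3, 4)
--
--     e.g.,
--     '6788889JQQKK222':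
--      [0 0 0 1 1 0 1 0 1 0 0 0 0 0 0]
--      [0 0 0 0 0 0 0 0 0 1 1 0 0 0 0]
--      [0 0 0 0 0 0 0 0 0 0 0 0 1 0 0]
--      [0 0 0 0 0 1 0 0 0 0 0 0 0 0 0]]
--
--      if player has '8888': in 6th column only 4th row is 1, rest rows are 0s.
--     '''
--
--     if not cards:
--         return None
--     layer = 0
--     if len(cards) == 1:
--         rank = CARD_RANK_STR.index(cards[0])
--         plane[layer][rank] = 1
--     else:
--         for index, card in enumerate(cards):
--             if index == 0:
--                 continue
--             if card == cards[index - 1]: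
--                 layer += 1
--             else:
--                 rank = CARD_RANK_STR.index(cards[index - 1])
--                 plane[layer][rank] = 1
--                 layer = 0
--         rank = CARD_RANK_STR.index(cards[-1])
--         plane[layer][rank] = 1
--     return plane
-- ===== SOURCE B (Python) =====
-- CARD_RANK_STR = ['3', '4', '5', '6', '7', '8', '9', 'T', 'J', 'Q', 'K',
--                  'A', '2', 'B', 'R']
--
-- def encode_cards(plane, cards):
--     if not cards:
--         return None
--     n = len(cards)
--     # staged passes: first collect the end index of every maximal consecutive
--     # run, then pair each end with the previous end; the index difference IS
--     # the run length, so no running counter is carried through the scan.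
--     ends = [i for i in range(n) if i == n - 1 or cards[i + 1] != cards[i]]
--     for prev, end in zip([-1] + ends, ends):
--         plane[end - prev - 1][CARD_RANK_STR.index(cards[end])] = 1
--     return plane
-- ===== Notes on version B (the rewrite author's own statement) =====
-- stated objective: alternative
-- what changed: Replaces A's single-pass scan with a running layer counter, write-on-change/final-flush logic and a length-1 special case by two staged passes: first collect the end index of every maximal run with a range filter, then zip each run end with the previous end and write one plane cell per pair, the index difference giving the run length.
import Mathlib
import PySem

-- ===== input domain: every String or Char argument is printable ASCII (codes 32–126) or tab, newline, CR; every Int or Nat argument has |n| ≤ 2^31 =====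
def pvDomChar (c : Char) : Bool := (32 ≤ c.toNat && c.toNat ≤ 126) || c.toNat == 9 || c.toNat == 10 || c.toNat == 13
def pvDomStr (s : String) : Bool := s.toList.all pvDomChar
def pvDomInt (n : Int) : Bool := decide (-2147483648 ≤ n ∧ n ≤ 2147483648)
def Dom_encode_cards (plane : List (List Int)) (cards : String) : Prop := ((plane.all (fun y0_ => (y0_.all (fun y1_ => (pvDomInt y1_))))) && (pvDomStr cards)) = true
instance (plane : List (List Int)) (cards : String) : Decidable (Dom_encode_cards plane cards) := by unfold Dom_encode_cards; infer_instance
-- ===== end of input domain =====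

-- B replaces A's single-pass scan (running layer counter, write-on-change/flush logic,
-- length-1 special case) by two staged passes: first collect the end index of every maximal
-- run, then zip each end with the previous end and write one cell per pair, the index
-- difference giving the run length (objective: alternative).
-- Both programs mutate `plane` in place in Python; the equivalence proved here is about the
-- RETURN value (B performs the same writes, in the same order).

-- ===== PORT A =====
def cardRankStr : List Char :=
  ['3', '4', '5', '6', '7', '8', '9', 'T', 'J', 'Q', 'K', 'A', '2', 'B', 'R']

-- plane[layer][rank] = 1 with layer, rank ≥ 0 (as in A), so plain bounds checks are
-- exact for Python's IndexError; none = IndexError.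
def setCell (plane : List (List Int)) (layer rank : Nat) : Option (List (List Int)) :=
  match plane[layer]? with
  | none => none
  | some row =>
      if rank < row.length then some (plane.set layer (row.set rank 1)) else none

-- A's `for index, card in enumerate(cards)` loop (the index-0 `continue` makes it a walk
-- over consecutive pairs, transcribed as recursion carrying the previous card and `layer`).
def loopA (prev : Char) (layer : Nat) (rest : List Char) (plane : List (List Int)) :
    Option (List (List Int) × Nat) :=
  match rest with
  | [] => some (plane, layer)
  | c :: rest' =>
      if c == prev then loopA c (layer + 1) rest' plane
      else
        match cardRankStr.idxOf? prev with   -- CARD_RANK_STR.index(cards[index-1]); none = ValueError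
        | none => none
        | some rank =>
            match setCell plane layer rank with
            | none => none
            | some p => loopA c 0 rest' p

def encode_cards (plane : List (List Int)) (cards : String) : Option (List (List Int)) :=
  match cards.toList with
  | [] => none
  | [c] =>
      match cardRankStr.idxOf? c with
      | none => none
      | some rank => setCell plane 0 rank
  | c :: rest =>
      match loopA c 0 rest plane with
      | none => none
      | some (p, layer) =>
          match cardRankStr.idxOf? ((c :: rest).getLast (List.cons_ne_nil c rest)) with
          | none => none
          | some rank => setCell p layer rank

-- ===== PORT B =====
-- one write `plane[end - prev - 1][CARD_RANK_STR.index(cards[end])] = 1`, in B's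
-- evaluation order: row fetch, card fetch, rank lookup, element write;
-- none = IndexError/ValueError.  The final write-back of the updated row is the
-- functional image of Python's in-place row mutation (same index, known in range,
-- so pySetD is exact there).
def writePair (cs : List Char) (plane : List (List Int)) (p e : Int) :
    Option (List (List Int)) :=
  match PySem.List.pyGet? plane (e - p - 1) with
  | none => none
  | some row =>
      match PySem.List.pyGet? cs e with
      | none => none
      | some c =>
          match cardRankStr.idxOf? c with
          | none => none
          | some rank =>
              match PySem.List.pySet? row (rank : Int) 1 with
              | none => none
              | some row' => some (PySem.List.pySetD plane (e - p - 1) row')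

-- `for prev, end in zip([-1] + ends, ends): …`
def foldPairs (cs : List Char) (plane : List (List Int)) :
    List (Int × Int) → Option (List (List Int))
  | [] => some plane
  | (p, e) :: rest =>
      match writePair cs plane p e with
      | none => none
      | some plane' => foldPairs cs plane' rest

def encode_cards_alt (plane : List (List Int)) (cards : String) : Option (List (List Int)) :=
  let cs := cards.toList
  if cs.isEmpty then none    -- `if not cards: return None`
  else
    -- `ends = [i for i in range(n) if i == n - 1 or cards[i + 1] != cards[i]]`
    -- (the second test is only reached with i + 1 in range — `or` short-circuits —
    -- so default-valued indexing is exact here)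
    let ends : List Int := (PySem.List.pyRange 0 (cs.length : Int) 1).filter
      (fun i => i == (cs.length : Int) - 1
        || !(PySem.List.pyGetD cs (i + 1) ' ' == PySem.List.pyGetD cs i ' '))
    foldPairs cs plane (List.zip ((-1) :: ends) ends)

-- ===== PRECONDITION & SPEC =====
-- Pre_ excludes exactly the inputs where Python A raises: a card outside CARD_RANK_STR
-- (ValueError), or a maximal run of equal cards [i..j] whose length exceeds the number of
-- rows, or whose card's rank column does not exist in the row being written (IndexError).
-- On the empty string A RETURNS None, so it stays inside Pre_.
-- [i..j] is a maximal run of equal cards in cs (all equal inside, both boundaries maximal)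
def isMaxRun (cs : List Char) (i j : Nat) : Bool :=
  decide (i ≤ j) && decide (j < cs.length) &&
  ((List.range cs.length).all fun t =>
    !(decide (i ≤ t ∧ t ≤ j)) || (cs.getD t ' ' == cs.getD i ' ')) &&
  (decide (i = 0) || !(cs.getD (i - 1) ' ' == cs.getD i ' ')) &&
  (decide (j = cs.length - 1) || !(cs.getD (j + 1) ' ' == cs.getD j ' '))

-- the write for the maximal run [i..j] stays in bounds
def runOk (plane : List (List Int)) (cs : List Char) (i j : Nat) : Bool :=
  decide (j - i < plane.length) &&
  decide (cardRankStr.idxOf (cs.getD i ' ') < (plane.getD (j - i) []).length)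

def Pre_encode_cards (plane : List (List Int)) (cards : String) : Prop :=
  ((cards.toList.all (cardRankStr.contains ·)) &&
   ((List.range cards.toList.length).all fun i =>
     (List.range cards.toList.length).all fun j =>
       !isMaxRun cards.toList i j || runOk plane cards.toList i j)) = true
instance (plane : List (List Int)) (cards : String) : Decidable (Pre_encode_cards plane cards) := by
  unfold Pre_encode_cards; infer_instance

def pvWitness_encode_cards : List (List Int) × String :=
  ([[0], [0]], "33")

def Spec_encode_cards (plane : List (List Int)) (cards : String) (out : Option (List (List Int))) : Prop := out = encode_cards_alt plane cards
instance (plane : List (List Int)) (cards : String) (out : Option (List (List Int))) : Decidable (Spec_encode_cards plane cards out) := by unfold Spec_encode_cards; infer_instance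

-- ===== CLAIM (what is proved, stated in full; the proofs are below) =====
def Claim_equal_encode_cards : Prop := ∀ (plane : List (List Int)) (cards : String), Dom_encode_cards plane cards → Pre_encode_cards plane cards → Spec_encode_cards plane cards (encode_cards plane cards)

-- ===== LEMMAS AND PROOFS =====

-- ---- both programs are reduced to one common reference shape:
-- ---- one write per maximal consecutive run (card, run length), left to right ----
def runs : List Char → List (Char × Nat)
  | [] => []
  | c :: cs => (c, (cs.takeWhile (· == c)).length + 1) :: runs (cs.dropWhile (· == c))
termination_by l => l.length
decreasing_by simpa using Nat.lt_succ_of_le (List.length_dropWhile_le _ _)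

def writeRun (plane : List (List Int)) (c : Char) (k : Nat) : Option (List (List Int)) :=
  match plane[k - 1]? with
  | none => none
  | some row =>
      match cardRankStr.idxOf? c with
      | none => none
      | some rank =>
          if rank < row.length then some (plane.set (k - 1) (row.set rank 1)) else none

def foldRuns (plane : List (List Int)) : List (Char × Nat) → Option (List (List Int))
  | [] => some plane
  | (c, k) :: rs =>
      match writeRun plane c k with
      | none => none
      | some p => foldRuns p rs

-- ---- A equals the reference shape ----

-- A's loop followed by A's final flush, as one function (proof helper only).
def finishA (prev : Char) (layer : Nat) (rest : List Char) (plane : List (List Int)) :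
    Option (List (List Int)) :=
  match loopA prev layer rest plane with
  | none => none
  | some (p, ly) =>
      match cardRankStr.idxOf? ((prev :: rest).getLast (List.cons_ne_nil prev rest)) with
      | none => none
      | some rank => setCell p ly rank

-- add `layer` to the first run's count (the part of the current run A has already scanned)
def bump (layer : Nat) : List (Char × Nat) → List (Char × Nat)
  | [] => []
  | (c, k) :: rs => (c, k + layer) :: rs

theorem bump_zero (rs : List (Char × Nat)) : bump 0 rs = rs := by
  cases rs with
  | nil => rfl
  | cons p rs => cases p; simp [bump]

theorem writeRun_eq (plane : List (List Int)) (c : Char) (layer : Nat) :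
    writeRun plane c (layer + 1) =
      match cardRankStr.idxOf? c with
      | none => none
      | some rank => setCell plane layer rank := by
  unfold writeRun setCell
  rcases h : plane[layer]? with _ | row <;> rcases hr : cardRankStr.idxOf? c with _ | r <;>
    simp [h]

theorem finishA_eq (rest : List Char) :
    ∀ (prev : Char) (layer : Nat) (plane : List (List Int)),
      finishA prev layer rest plane = foldRuns plane (bump layer (runs (prev :: rest))) := by
  induction rest with
  | nil =>
      intro prev layer plane
      simp only [finishA, loopA, List.getLast_singleton, runs, List.takeWhile_nil,
        List.dropWhile_nil, List.length_nil, bump, foldRuns]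
      rw [show 0 + 1 + layer = layer + 1 by omega, writeRun_eq]
      rcases hr : cardRankStr.idxOf? prev with _ | r
      · simp
      · simp only
        cases setCell plane layer r <;> rfl
  | cons d rest' ih =>
      intro prev layer plane
      by_cases hd : d = prev
      · subst hd
        have h1 : finishA d layer (d :: rest') plane = finishA d (layer + 1) rest' plane := by
          simp [finishA, loopA, List.getLast_cons]
        have h2 : runs (d :: d :: rest') =
            (d, (rest'.takeWhile (· == d)).length + 2) :: runs (rest'.dropWhile (· == d)) := by
          simp [runs]
        have h3 : runs (d :: rest') =
            (d, (rest'.takeWhile (· == d)).length + 1) :: runs (rest'.dropWhile (· == d)) := by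
          simp [runs]
        rw [h1, ih, h2, h3]
        have harith : (rest'.takeWhile (· == d)).length + 1 + (layer + 1) =
            (rest'.takeWhile (· == d)).length + 2 + layer := by omega
        simp [bump, harith]
      · have hne : (d == prev) = false := by simp [hd]
        have hruns : runs (prev :: d :: rest') = (prev, 1) :: runs (d :: rest') := by
          simp [runs, hne]
        rw [hruns]
        simp only [bump]
        rw [show 1 + layer = layer + 1 by omega]
        simp only [foldRuns, writeRun_eq]
        simp only [finishA, loopA, hne, Bool.false_eq_true, if_false]
        rcases hr : cardRankStr.idxOf? prev with _ | r
        · simp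
        · simp only
          rcases hs : setCell plane layer r with _ | p
          · simp
          · simp only
            have hf := ih d 0 p
            rw [bump_zero] at hf
            rw [← hf]
            simp [finishA, List.getLast_cons]

theorem a_eq_runs (plane : List (List Int)) (cards : String) :
    encode_cards plane cards =
      if cards.toList.isEmpty then none else foldRuns plane (runs cards.toList) := by
  rcases h : cards.toList with _ | ⟨c, _ | ⟨d, rest⟩⟩ <;>
    simp only [encode_cards, h, List.isEmpty_cons, List.isEmpty_nil,
      Bool.false_eq_true, if_false, if_true]
  · rw [show runs [c] = [(c, (List.takeWhile (· == c) []).length + 1)] by rw [runs]; simp [runs]]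
    simp only [List.takeWhile_nil, List.length_nil, foldRuns]
    rw [show (0 + 1 : Nat) = 0 + 1 by rfl, writeRun_eq]
    rcases hr : cardRankStr.idxOf? c with _ | r
    · simp
    · simp only
      cases setCell plane 0 r <;> rfl
  · have hf := finishA_eq (d :: rest) c 0 plane
    rw [bump_zero] at hf
    simp only [finishA] at hf
    exact hf

-- ---- B equals the reference shape ----

-- recursive characterisation of B's `ends` list (run-end indices)
def endsR : List Char → List Nat
  | [] => []
  | c :: cs => (cs.takeWhile (· == c)).length ::
      (endsR (cs.dropWhile (· == c))).map (· + ((cs.takeWhile (· == c)).length + 1))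
termination_by l => l.length
decreasing_by simpa using Nat.lt_succ_of_le (List.length_dropWhile_le _ _)

-- B's filter condition, on the Nat side
def condF (cs : List Char) (i : Nat) : Bool :=
  decide (i = cs.length - 1) || !(cs.getD (i + 1) ' ' == cs.getD i ' ')

-- inside the leading run every card is the head card
theorem run_getD (c : Char) (cs : List Char) (i : Nat)
    (h : i ≤ (cs.takeWhile (· == c)).length) : (c :: cs).getD i ' ' = c := by
  cases i with
  | zero => rfl
  | succ j =>
      have hj : j < (cs.takeWhile (· == c)).length := Nat.lt_of_succ_le h
      have hj' : j < cs.length :=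
        lt_of_lt_of_le hj (List.IsPrefix.length_le (List.takeWhile_prefix _))
      have hel : cs[j] = (cs.takeWhile (· == c))[j]'hj :=
        (List.IsPrefix.getElem (List.takeWhile_prefix _) hj).symm
      have h2 : (cs.takeWhile (· == c))[j]'hj ∈ cs.takeWhile (· == c) := List.getElem_mem hj
      have h3 : ((cs.takeWhile (· == c))[j]'hj == c) = true :=
        List.mem_takeWhile_imp (p := (· == c)) h2
      have : cs[j] = c := by rw [hel]; exact eq_of_beq h3
      simp [List.getD, List.getElem?_eq_getElem hj', this]

-- indexing past the leading run reaches the dropped suffix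
theorem drop_getD (c : Char) (cs : List Char) (j : Nat) :
    (c :: cs).getD ((cs.takeWhile (· == c)).length + 1 + j) ' '
      = (cs.dropWhile (· == c)).getD j ' ' := by
  have hsplit : c :: cs = (c :: cs.takeWhile (· == c)) ++ cs.dropWhile (· == c) := by
    simp [List.takeWhile_append_dropWhile]
  rw [hsplit, List.getD, List.getD]
  rw [show (cs.takeWhile (· == c)).length + 1 + j
      = (c :: cs.takeWhile (· == c)).length + j by simp [Nat.add_comm]]
  rw [List.getElem?_append_right (by omega)]
  simp

-- the filtered range is exactly the run-end list
theorem ends_filter (n : Nat) : ∀ (cs : List Char), cs.length ≤ n →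
    (List.range cs.length).filter (condF cs) = endsR cs := by
  induction n with
  | zero =>
      intro cs h
      have : cs = [] := List.eq_nil_of_length_eq_zero (by omega)
      subst this; simp [endsR]
  | succ n ih =>
    intro cs hlen
    cases cs with
    | nil => simp [endsR]
    | cons c cs' =>
      have hsplitlen : (cs'.takeWhile (· == c)).length + (cs'.dropWhile (· == c)).length
          = cs'.length := by
        rw [← List.length_append, List.takeWhile_append_dropWhile]
      set t := cs'.takeWhile (· == c) with ht
      set d := cs'.dropWhile (· == c) with hd
      set k := t.length with hk
      have hlen2 : (c :: cs').length = (k + 1) + d.length := by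
        simp only [List.length_cons]; omega
      have hrange : List.range ((c :: cs').length)
          = (List.range (k + 1) ++ (List.range d.length).map ((k + 1) + ·)) := by
        rw [hlen2, List.range_add]
      have hrun : ∀ i ≤ k, (c :: cs').getD i ' ' = c := fun i hi => run_getD c cs' i hi
      have hdrop : ∀ j, (c :: cs').getD (k + 1 + j) ' ' = d.getD j ' ' := fun j =>
        drop_getD c cs' j
      have hfalse : ∀ i ∈ List.range k, condF (c :: cs') i = false := by
        intro i hi
        have hik : i < k := List.mem_range.mp hi
        have h1 : (c :: cs').getD (i + 1) ' ' = c := hrun _ (by omega)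
        have h2 : (c :: cs').getD i ' ' = c := hrun _ (by omega)
        simp only [condF]; rw [h1, h2]; simp; omega
      have htrue : condF (c :: cs') k = true := by
        cases hdc : d with
        | nil =>
            have : k = (c :: cs').length - 1 := by rw [hlen2, hdc]; simp
            simp only [condF, this]; simp
        | cons d0 d' =>
            have hne : (d0 == c) = false := by
              have h5 := List.head?_dropWhile_not (· == c) cs'
              rw [← hd, hdc] at h5
              simpa using h5
            have h1 : (c :: cs').getD (k + 1) ' ' = d0 := by
              have h6 := hdrop 0
              rw [hdc] at h6
              simpa using h6
            have h2 : (c :: cs').getD k ' ' = c := hrun _ le_rfl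
            simp only [condF]; rw [h1, h2]; simp [hne]
      have hshift : ∀ j ∈ List.range d.length,
          condF (c :: cs') ((k + 1) + j) = condF d j := by
        intro j hj
        have hjd : j < d.length := List.mem_range.mp hj
        have h1 : (c :: cs').getD (k + 1 + j + 1) ' ' = d.getD (j + 1) ' ' := by
          have := hdrop (j + 1)
          rw [show k + 1 + j + 1 = k + 1 + (j + 1) by omega]
          exact this
        have h2 : (c :: cs').getD (k + 1 + j) ' ' = d.getD j ' ' := hdrop j
        have h3 : decide (k + 1 + j = (c :: cs').length - 1) = decide (j = d.length - 1) := by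
          rw [hlen2]
          by_cases hc : j = d.length - 1 <;> simp [hc] <;> omega
        simp only [condF]; rw [h1, h2, h3]
      rw [hrange, List.filter_append]
      rw [show List.range (k + 1) = List.range k ++ [k] from by rw [List.range_succ]]
      rw [List.filter_append, List.filter_eq_nil_iff.mpr (by intro a ha; simp [hfalse a ha]),
        List.filter_singleton, htrue]
      rw [List.filter_map, List.filter_congr (by intro j hj; simpa using hshift j hj)]
      rw [ih d (by omega)]
      show _ = endsR (c :: cs')
      rw [endsR]
      simp [← ht, ← hd, ← hk, Nat.add_comm]

-- B's Int-side `ends` is the Nat-side filtered range, cast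
theorem ends_port (cs : List Char) (h : cs ≠ []) :
    (PySem.List.pyRange 0 (cs.length : Int) 1).filter
      (fun i => i == (cs.length : Int) - 1
        || !(PySem.List.pyGetD cs (i + 1) ' ' == PySem.List.pyGetD cs i ' '))
    = ((List.range cs.length).filter (condF cs)).map (Nat.cast) := by
  rw [PySem.List.pyRange_zero_natCast, List.filter_map]
  show List.map (fun k : Nat => (k : Int)) _ = _
  congr 1
  apply List.filter_congr
  intro i hi
  have hn : 1 ≤ cs.length := by
    cases cs with | nil => simp at h | cons _ _ => simp
  simp only [Function.comp_apply, condF]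
  have h1 : ((i : Int) == (cs.length : Int) - 1) = decide (i = cs.length - 1) := by
    rw [show ((cs.length : Int) - 1) = ((cs.length - 1 : Nat) : Int) by push_cast [hn]; ring]
    by_cases hc : i = cs.length - 1 <;> simp [hc]
  have h2 : PySem.List.pyGetD cs ((i : Int) + 1) ' ' = cs.getD (i + 1) ' ' := by
    rw [show ((i : Int) + 1) = ((i + 1 : Nat) : Int) by push_cast; ring,
      PySem.List.pyGetD_natCast]
  rw [h1, h2, PySem.List.pyGetD_natCast]

-- B's write for the leading run equals the reference write
theorem writePair_head (c : Char) (cs' : List Char) (plane : List (List Int)) :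
    writePair (c :: cs') plane (-1) ((cs'.takeWhile (· == c)).length : Int)
      = writeRun plane c ((cs'.takeWhile (· == c)).length + 1) := by
  set k := (cs'.takeWhile (· == c)).length with hk
  have hkl : k < (c :: cs').length := by
    have := List.IsPrefix.length_le (List.takeWhile_prefix (p := (· == c)) (l := cs'))
    simp; omega
  have hget : PySem.List.pyGet? (c :: cs') (k : Int) = some c := by
    rw [PySem.List.pyGet?_natCast, List.getElem?_eq_getElem hkl]
    have := run_getD c cs' k le_rfl
    simp [List.getD, List.getElem?_eq_getElem hkl] at this
    simp [this]
  unfold writePair writeRun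
  rw [show ((k : Int) - (-1) - 1) = (k : Int) by ring]
  rw [PySem.List.pyGet?_natCast, hget]
  simp only [Nat.add_sub_cancel]
  rcases hrow : plane[k]? with _ | row
  · rfl
  · rcases hr : cardRankStr.idxOf? c with _ | rank
    · rfl
    · simp only
      by_cases hlt : rank < row.length
      · rw [PySem.List.pySet?_natCast row rank 1 hlt]
        simp [hlt, PySem.List.pySetD_natCast]
      · rw [(PySem.List.pySet?_eq_none_iff _ _ _).mpr (by simp [PySem.Raise.InRange]; omega)]
        simp [hlt]

-- writes only depend on the index difference and the suffix: shifting both components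
-- by the prefix length moves the fold from the suffix to the full list
theorem foldPairs_shift (pre rest : List Char) (pairs : List (Int × Int))
    (h : ∀ pr ∈ pairs, ∃ m : Nat, pr.2 = (m : Int)) :
    ∀ plane, foldPairs (pre ++ rest) plane
        (pairs.map (Prod.map (· + (pre.length : Int)) (· + (pre.length : Int))))
      = foldPairs rest plane pairs := by
  induction pairs with
  | nil => intro plane; rfl
  | cons pr pairs ih =>
      intro plane
      obtain ⟨p, e⟩ := pr
      obtain ⟨m, hm⟩ := h (p, e) (by simp)
      subst hm
      have hw : writePair (pre ++ rest) plane (p + pre.length) ((m : Int) + pre.length)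
          = writePair rest plane p m := by
        unfold writePair
        rw [show ((m : Int) + pre.length - (p + pre.length) - 1) = (m : Int) - p - 1 by ring]
        rw [show ((m : Int) + (pre.length : Int)) = ((pre.length + m : Nat) : Int) by
          push_cast; ring]
        rw [PySem.List.pyGet?_natCast, PySem.List.pyGet?_natCast,
          List.getElem?_append_right (by omega), Nat.add_sub_cancel_left]
      cases hwp : writePair rest plane p (m : Int) with
      | none => simp [foldPairs, Prod.map_apply, hw, hwp]
      | some plane' =>
          simp only [List.map_cons, foldPairs, Prod.map_apply, hw, hwp]
          exact ih (fun pr hpr => h pr (by simp [hpr])) plane'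

theorem foldPairs_runs (n : Nat) : ∀ cs : List Char, cs.length ≤ n → ∀ plane,
    foldPairs cs plane (List.zip ((-1) :: (endsR cs).map (Nat.cast)) ((endsR cs).map Nat.cast))
      = foldRuns plane (runs cs) := by
  induction n with
  | zero =>
      intro cs h plane
      have : cs = [] := List.eq_nil_of_length_eq_zero (by omega)
      subst this; simp [endsR, runs, foldPairs, foldRuns]
  | succ n ih =>
      intro cs hlen plane
      cases cs with
      | nil => simp [endsR, runs, foldPairs, foldRuns]
      | cons c cs' =>
        set t := cs'.takeWhile (· == c) with ht
        set d := cs'.dropWhile (· == c) with hd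
        set k := t.length with hk
        have hends : endsR (c :: cs') = k :: (endsR d).map (· + (k + 1)) := by
          rw [endsR]
        have hruns : runs (c :: cs') = (c, k + 1) :: runs d := by rw [runs]
        have hzipmap : ∀ (es : List Int) (L : Int),
            List.zip ((-1 + L) :: es.map (· + L)) (es.map (· + L))
              = (List.zip ((-1) :: es) es).map (Prod.map (· + L) (· + L)) := by
          intro es L
          rw [show ((-1 + L) :: es.map (· + L)) = ((-1) :: es).map (· + L) by simp]
          rw [List.zip_map]
        have hcast : (endsR (c :: cs')).map (Nat.cast (R := Int))
            = (k : Int) :: ((endsR d).map (Nat.cast (R := Int))).map (· + ((k : Int) + 1)) := by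
          rw [hends]
          simp [Function.comp]
        rw [hcast, hruns]
        simp only [List.zip_cons_cons, foldPairs]
        rw [show ((k : Int) :: ((endsR d).map (Nat.cast (R := Int))).map (· + ((k : Int) + 1)))
            = ((-1 + ((k : Int) + 1)) :: ((endsR d).map (Nat.cast (R := Int))).map
                (· + ((k : Int) + 1))) by norm_num]
        rw [hzipmap]
        have hcsplit : c :: cs' = (c :: t) ++ d := by
          simp [ht, hd, List.takeWhile_append_dropWhile]
        have hPrelen : ((c :: t).length : Int) = (k : Int) + 1 := by simp [hk]
        have hw := writePair_head c cs' plane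
        rw [← ht, ← hk] at hw
        rw [hw]
        unfold foldRuns
        cases hwr : writeRun plane c (k + 1) with
        | none => rfl
        | some plane' =>
          have hshift := foldPairs_shift (c :: t) d
            (List.zip ((-1) :: (endsR d).map (Nat.cast)) ((endsR d).map Nat.cast))
            (by
              intro pr hpr
              rcases List.of_mem_zip hpr with ⟨_, h2⟩
              rcases List.mem_map.mp h2 with ⟨m, _, hm⟩
              exact ⟨m, hm.symm⟩) plane'
          rw [hPrelen, ← hcsplit] at hshift
          dsimp only
          rw [hshift]
          exact ih d (by
            have hdl : d.length ≤ cs'.length := by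
              rw [hd]; exact List.length_dropWhile_le _ _
            simp at hlen
            omega) plane'

theorem alt_eq_runs (plane : List (List Int)) (cards : String) :
    encode_cards_alt plane cards =
      if cards.toList.isEmpty then none else foldRuns plane (runs cards.toList) := by
  by_cases h : cards.toList.isEmpty
  · simp [encode_cards_alt, h]
  · have hne : cards.toList ≠ [] := by simpa [List.isEmpty_iff] using h
    simp only [encode_cards_alt, h, Bool.false_eq_true, if_false]
    rw [ends_port _ hne, ends_filter cards.toList.length _ le_rfl]
    exact foldPairs_runs cards.toList.length _ le_rfl plane

theorem main_eq (plane : List (List Int)) (cards : String) :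
    encode_cards plane cards = encode_cards_alt plane cards := by
  rw [a_eq_runs, alt_eq_runs]

-- ===== VERDICT (by name: the statement is the Claim_ definition above) =====
theorem encode_cards_spec : Claim_equal_encode_cards := by
  intro plane cards _ _
  unfold Spec_encode_cards
  exact main_eq plane cards
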